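-- pv_equiv track=rewrite | github.com/mangpoo/coding-challenges | 프로그래머스/2/150368. 이모티콘 할인행사/이모티콘 할인행사.py | solution
-- ===== SOURCE A (Python) =====
-- from itertools import product
--
-- def solution(users, emoticons):
--
--     discount_rate = [10, 20, 30, 40]
--     max_plus = 0
--     max_sales = 0
--     answer = []
--
--     for d in product(discount_rate, repeat=len(emoticons)):
--         emoticon_plus = 0
--         sales = 0
--         for user_rate, user_price in users:
--             sum = 0
--
--             for i in range(len(emoticons)):
--                 if d[i] >= user_rate:
--                     sum += emoticons[i] * (100 - d[i]) // 100
--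
--             if sum >= user_price:
--                 emoticon_plus += 1
--             else:
--                 sales += sum
--
--         if emoticon_plus > max_plus:
--             max_plus = emoticon_plus
--             max_sales = sales
--         elif emoticon_plus == max_plus:
--             max_sales = max(max_sales, sales)
--
--     answer.append(max_plus)
--     answer.append(max_sales)
--
--     return answer
-- ===== SOURCE B (Python) =====
-- def solution(users, emoticons):
--     n = len(emoticons)
--     best = [0, 0]  # [max_plus, max_sales]
--
--     def evaluate(d):
--         plus = 0
--         sales = 0
--         for user_rate, user_price in users:
--             total = 0
--             for disc, price in zip(d, emoticons):
--                 if disc >= user_rate: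
--                     total += price * (100 - disc) // 100
--             if total >= user_price:
--                 plus += 1
--             else:
--                 sales += total
--         if plus > best[0]:
--             best[0] = plus
--             best[1] = sales
--         elif plus == best[0]:
--             best[1] = max(best[1], sales)
--
--     def dfs(i, d):
--         if i == n:
--             evaluate(d)
--             return
--         for r in (10, 20, 30, 40):
--             d.append(r)
--             dfs(i + 1, d)
--             d.pop()
--
--     dfs(0, [])
--     return best
-- ===== Notes on version B (the rewrite author's own statement) =====
-- stated objective: alternative
-- what changed: Replaces the itertools.product enumeration of rate tuples with a recursive backtracking DFS (append/recurse/pop) and evaluates each assignment by zipping rates with emoticons instead of indexing by range(len(...)).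
import Mathlib
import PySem

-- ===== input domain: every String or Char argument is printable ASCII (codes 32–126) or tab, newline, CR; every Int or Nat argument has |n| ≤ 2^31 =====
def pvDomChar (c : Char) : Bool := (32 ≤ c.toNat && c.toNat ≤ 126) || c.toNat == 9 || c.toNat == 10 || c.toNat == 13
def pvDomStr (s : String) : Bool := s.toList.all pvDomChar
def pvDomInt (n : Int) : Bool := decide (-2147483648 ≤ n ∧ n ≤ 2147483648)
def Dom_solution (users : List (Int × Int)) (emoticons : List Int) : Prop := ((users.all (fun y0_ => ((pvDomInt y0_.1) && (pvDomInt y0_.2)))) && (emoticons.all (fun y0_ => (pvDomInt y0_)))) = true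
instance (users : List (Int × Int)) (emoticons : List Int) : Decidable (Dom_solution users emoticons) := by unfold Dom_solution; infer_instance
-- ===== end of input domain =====

-- B replaces A's itertools.product enumeration by a recursive backtracking DFS and
-- evaluates each rate assignment by zipping rates with emoticons instead of indexing
-- by range(len(...)); same cost, alternative decomposition.

-- ===== PORT A =====
-- product([10,20,30,40], repeat=n), in itertools order (leftmost varies slowest)
def pvProdTuplesA : Nat → List (List Int)
  | 0 => [[]]
  | n + 1 => [(10 : Int), 20, 30, 40].flatMap (fun r => (pvProdTuplesA n).map (fun t => r :: t))

-- the inner two loops of A for one tuple d: (emoticon_plus, sales);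
-- d[i] / emoticons[i] ported as pyGetD (every index of range(len(emoticons)) is in range)
def pvEvalA (users : List (Int × Int)) (emoticons : List Int) (d : List Int) : Int × Int :=
  users.foldl (fun ps u =>
    let s : Int := (PySem.List.pyRange 0 (emoticons.length : Int) 1).foldl
      (fun acc i =>
        if PySem.List.pyGetD d i 0 ≥ u.1 then
          acc + PySem.Int.floordiv (PySem.List.pyGetD emoticons i 0 * (100 - PySem.List.pyGetD d i 0)) 100
        else acc) 0
    if s ≥ u.2 then (ps.1 + 1, ps.2) else (ps.1, ps.2 + s)) (0, 0)

-- A's running-max update: 'if emoticon_plus > max_plus … elif == … max(…)'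
def pvUpdateA (best cur : Int × Int) : Int × Int :=
  if cur.1 > best.1 then cur
  else if cur.1 = best.1 then (best.1, max best.2 cur.2)
  else best

def solution (users : List (Int × Int)) (emoticons : List Int) : List Int :=
  let res := (pvProdTuplesA emoticons.length).foldl
    (fun best d => pvUpdateA best (pvEvalA users emoticons d)) (0, 0)
  [res.1, res.2]

-- ===== PORT B =====
-- B's evaluate(d): per-user total over zip(d, emoticons)
def pvEvalB (users : List (Int × Int)) (emoticons : List Int) (d : List Int) : Int × Int :=
  users.foldl (fun ps u =>
    let total : Int := (d.zip emoticons).foldl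
      (fun acc p =>
        if p.1 ≥ u.1 then acc + PySem.Int.floordiv (p.2 * (100 - p.1)) 100 else acc) 0
    if total ≥ u.2 then (ps.1 + 1, ps.2) else (ps.1, ps.2 + total)) (0, 0)

-- B's best-update (same comparison as its Python)
def pvUpdateB (best cur : Int × Int) : Int × Int :=
  if cur.1 > best.1 then cur
  else if cur.1 = best.1 then (best.1, max best.2 cur.2)
  else best

-- dfs(i, d): recursion on the number of emoticons still to assign, threading best
def pvDfsB (users : List (Int × Int)) (emoticons : List Int) : Nat → List Int → Int × Int → Int × Int
  | 0, d, best => pvUpdateB best (pvEvalB users emoticons d)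
  | k + 1, d, best =>
      [(10 : Int), 20, 30, 40].foldl (fun b r => pvDfsB users emoticons k (d ++ [r]) b) best

def solution_alt (users : List (Int × Int)) (emoticons : List Int) : List Int :=
  let res := pvDfsB users emoticons emoticons.length [] (0, 0)
  [res.1, res.2]

-- ===== PRECONDITION & SPEC =====
def Spec_solution (users : List (Int × Int)) (emoticons : List Int) (out : List Int) : Prop := out = solution_alt users emoticons
instance (users : List (Int × Int)) (emoticons : List Int) (out : List Int) : Decidable (Spec_solution users emoticons out) := by unfold Spec_solution; infer_instance

-- ===== CLAIM (what is proved, stated in full; the proofs are below) =====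
def Claim_equal_solution : Prop := ∀ (users : List (Int × Int)) (emoticons : List Int), Dom_solution users emoticons → Spec_solution users emoticons (solution users emoticons)

-- ===== LEMMAS AND PROOFS =====

theorem pv_len_mem_prodTuples (n : Nat) (t : List Int) (h : t ∈ pvProdTuplesA n) : t.length = n := by
  induction n generalizing t with
  | zero => simp [pvProdTuplesA] at h; simp [h]
  | succ k ih =>
      simp [pvProdTuplesA] at h
      rcases h with ⟨s, hs, rfl⟩ | ⟨s, hs, rfl⟩ | ⟨s, hs, rfl⟩ | ⟨s, hs, rfl⟩ <;>
        simp [ih s hs]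

-- index loop over range(len e) with d[i], e[i] = fold over zip(d, e), when lengths agree
theorem pv_zip_index_foldl {α : Type} (d e : List Int) (h : d.length = e.length)
    (f : α → Int → Int → α) (init : α) :
    (PySem.List.pyRange 0 (e.length : Int) 1).foldl
      (fun acc i => f acc (PySem.List.pyGetD d i 0) (PySem.List.pyGetD e i 0)) init
    = (d.zip e).foldl (fun acc p => f acc p.1 p.2) init := by
  have hlen : (d.zip e).length = e.length := by simp [List.length_zip, h]
  have h1 : (PySem.List.pyRange 0 ((d.zip e).length : Int) 1).foldl
      (fun acc i => (fun acc (p : Int × Int) => f acc p.1 p.2) acc (PySem.List.pyGetD (d.zip e) i (0, 0))) init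
      = (d.zip e).foldl (fun acc p => f acc p.1 p.2) init :=
    PySem.List.foldl_pyRange_zero_pyGetD' (d.zip e) (0, 0) (fun acc p => f acc p.1 p.2) init
  rw [← hlen]
  rw [← h1]
  apply PySem.List.foldl_congr_mem
  intro acc i hi
  have hmem := (PySem.List.mem_pyRange_one).1 hi
  have h0 : 0 ≤ i := hmem.1
  have h2 : i < ((d.zip e).length : Int) := hmem.2
  have hzd : i.toNat < (d.zip e).length := by omega
  have hd : i.toNat < d.length := by omega
  have he : i.toNat < e.length := by omega
  rw [PySem.List.pyGetD_eq_getElem (d.zip e) (0, 0) h0 (by exact_mod_cast h2),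
      PySem.List.pyGetD_eq_getElem d 0 h0 (by omega),
      PySem.List.pyGetD_eq_getElem e 0 h0 (by omega)]
  simp [List.getElem_zip]

theorem pv_eval_eq (users : List (Int × Int)) (emoticons : List Int) (d : List Int)
    (h : d.length = emoticons.length) :
    pvEvalA users emoticons d = pvEvalB users emoticons d := by
  unfold pvEvalA pvEvalB
  apply PySem.List.foldl_congr_mem
  intro ps u _
  have := pv_zip_index_foldl d emoticons h
    (fun acc a b => if a ≥ u.1 then acc + PySem.Int.floordiv (b * (100 - a)) 100 else acc) (0 : Int)
  simp only at this ⊢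
  rw [this]

theorem pv_dfs_eq (users : List (Int × Int)) (emoticons : List Int) :
    ∀ (k : Nat) (d : List Int) (best : Int × Int),
    pvDfsB users emoticons k d best
      = ((pvProdTuplesA k).map (fun t => d ++ t)).foldl
          (fun b t => pvUpdateB b (pvEvalB users emoticons t)) best := by
  intro k
  induction k with
  | zero => intro d best; simp [pvDfsB, pvProdTuplesA]
  | succ k ih =>
      intro d best
      simp only [pvDfsB, pvProdTuplesA, List.flatMap_cons, List.flatMap_nil, List.append_nil,
        List.map_append, List.foldl_append, List.map_map, List.foldl_cons, List.foldl_nil]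
      have comp : ∀ r : Int, ((fun t => d ++ t) ∘ (fun t => r :: t)) = (fun t => (d ++ [r]) ++ t) := by
        intro r; funext t; simp
      rw [comp, comp, comp, comp, ih, ih, ih, ih]

theorem pv_solution_eq (users : List (Int × Int)) (emoticons : List Int) :
    solution users emoticons = solution_alt users emoticons := by
  unfold solution solution_alt
  rw [pv_dfs_eq]
  have hmap : List.map (fun t : List Int => [] ++ t) (pvProdTuplesA emoticons.length)
      = pvProdTuplesA emoticons.length := by
    simp
  rw [hmap]
  have : (pvProdTuplesA emoticons.length).foldl
      (fun best d => pvUpdateA best (pvEvalA users emoticons d)) (0, 0)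
      = (pvProdTuplesA emoticons.length).foldl
      (fun b t => pvUpdateB b (pvEvalB users emoticons t)) (0, 0) := by
    apply PySem.List.foldl_congr_mem
    intro b t ht
    rw [pv_eval_eq users emoticons t (pv_len_mem_prodTuples _ t ht)]
    rfl
  rw [this]

-- ===== VERDICT (by name: the statement is the Claim_ definition above) =====
theorem solution_spec : Claim_equal_solution := by
  intro users emoticons _
  unfold Spec_solution
  exact pv_solution_eq users emoticons
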